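-- pv_equiv track=rewrite | github.com/hyeryeongeda/review_algorithm | IM_PROBLOM/02_basballplayer/baseball_player.py | bb_player
-- ===== SOURCE A (Python) =====
-- def bb_player(N,K,arr):
--     arr.sort()
--     left, right = 0, 0
--     ret = 0
--
--     while left < N and right< N:
--         if arr[right] - arr[left] > K:
--             left += 1
--         else:
--             right+=1
--         ret = max(right-left,ret)
--     return ret
-- ===== SOURCE B (Python) =====
-- def bb_player(N, K, arr):
--     arr.sort()
--     ret = 0
--     for i in range(N):
--         # hand-written bisect_left(arr, arr[i]-K, 0, N)
--         x = arr[i] - K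
--         lo, hi = 0, N
--         while lo < hi:
--             mid = (lo + hi) // 2
--             if arr[mid] < x:
--                 lo = mid + 1
--             else:
--                 hi = mid
--         ret = max(ret, i - lo + 1)
--     return ret
-- ===== Notes on version B (the rewrite author's own statement) =====
-- stated objective: alternative
-- what changed: Replaced the maintained two-pointer sliding window after the sort by an independent hand-written binary search (bisect_left) per right endpoint i, taking max(ret, i - l + 1); no left pointer state is carried between iterations.
import Mathlib
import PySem

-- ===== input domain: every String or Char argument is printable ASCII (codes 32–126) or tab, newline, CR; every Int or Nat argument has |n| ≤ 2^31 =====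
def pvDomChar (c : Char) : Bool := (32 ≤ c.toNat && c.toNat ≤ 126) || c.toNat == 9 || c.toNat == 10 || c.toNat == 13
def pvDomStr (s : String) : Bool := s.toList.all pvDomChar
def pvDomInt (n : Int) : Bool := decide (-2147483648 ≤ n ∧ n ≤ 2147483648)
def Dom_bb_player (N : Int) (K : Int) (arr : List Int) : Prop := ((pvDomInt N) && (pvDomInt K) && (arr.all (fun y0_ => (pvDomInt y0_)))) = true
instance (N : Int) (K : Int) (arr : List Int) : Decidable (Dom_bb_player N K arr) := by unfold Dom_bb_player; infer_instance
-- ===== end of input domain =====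

-- B replaces A's two-pointer sliding window by an independent binary search per right endpoint
-- (alternative structure, same cost class). Both A and B sort `arr` in place; the equivalence
-- proved is about the RETURN value (the in-place sort side effect is identical in A and B).

-- ===== PORT A =====
-- 'while left < N and right < N: ...'; the Nat fuel only makes the loop total: it starts at the
-- exact number of remaining iterations and under Pre_ the guard is false whenever it reaches 0.
def bbLoopA (N : Int) (K : Int) (s : List Int) : Nat → Int → Int → Int → Int
  | 0, _l, _r, ret => ret
  | fuel + 1, l, r, ret =>
    if l < N ∧ r < N then
      if PySem.List.pyGetD s r 0 - PySem.List.pyGetD s l 0 > K then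
        bbLoopA N K s fuel (l + 1) r (max (r - (l + 1)) ret)
      else
        bbLoopA N K s fuel l (r + 1) (max (r + 1 - l) ret)
    else ret

def bb_player (N : Int) (K : Int) (arr : List Int) : Int :=
  bbLoopA N K (PySem.List.sorted arr (fun x => x) false) (N.toNat + N.toNat) 0 0 0

-- ===== PORT B =====
-- hand-written bisect_left loop of Source B: 'while lo < hi: mid = (lo+hi)//2 ...'; fuel as above.
def bisLoop (s : List Int) (x : Int) : Nat → Int → Int → Int
  | 0, lo, _hi => lo
  | fuel + 1, lo, hi =>
    if lo < hi then
      if PySem.List.pyGetD s (PySem.Int.floordiv (lo + hi) 2) 0 < x then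
        bisLoop s x fuel (PySem.Int.floordiv (lo + hi) 2 + 1) hi
      else
        bisLoop s x fuel lo (PySem.Int.floordiv (lo + hi) 2)
    else lo

def bb_player_alt (N : Int) (K : Int) (arr : List Int) : Int :=
  let s := PySem.List.sorted arr (fun x => x) false
  (PySem.List.pyRange 0 N 1).foldl
    (fun ret i => max ret (i - bisLoop s (PySem.List.pyGetD s i 0 - K) N.toNat 0 N + 1)) 0

-- ===== PRECONDITION & SPEC =====
-- Pre_ excludes exactly the inputs where A raises IndexError: when 0 < N and N > len(arr), a
-- pointer reaches len(arr) while still < N and arr[...] raises. (N ≤ 0 is inside Pre_.)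
def Pre_bb_player (N : Int) (K : Int) (arr : List Int) : Prop := N ≤ (arr.length : Int)
instance (N : Int) (K : Int) (arr : List Int) : Decidable (Pre_bb_player N K arr) := by unfold Pre_bb_player; infer_instance
def pvWitness_bb_player : Int × Int × List Int := (3, 2, [4, 1, 3])

def Spec_bb_player (N : Int) (K : Int) (arr : List Int) (out : Int) : Prop := out = bb_player_alt N K arr
instance (N : Int) (K : Int) (arr : List Int) (out : Int) : Decidable (Spec_bb_player N K arr out) := by unfold Spec_bb_player; infer_instance

-- ===== CLAIM (what is proved, stated in full; the proofs are below) =====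
def Claim_equal_bb_player : Prop := ∀ (N : Int) (K : Int) (arr : List Int), Dom_bb_player N K arr → Pre_bb_player N K arr → Spec_bb_player N K arr (bb_player N K arr)

-- ===== LEMMAS AND PROOFS =====

-- `pyGetD` at a nonnegative Int index is `getD` at its toNat
theorem pyGetD_toNat (s : List Int) (i : Int) (d : Int) (hi : 0 ≤ i) :
    PySem.List.pyGetD s i d = s.getD i.toNat d := by
  have h1 : i = ((i.toNat : ℕ) : ℤ) := by omega
  have h2 : ((i.toNat : ℕ) : ℤ).toNat = i.toNat := by omega
  rw [h1, PySem.List.pyGetD_natCast, h2]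

-- sorted lists are getD-monotone inside range
theorem getD_mono (s : List Int) (hs : s.Pairwise (· ≤ ·)) {i j : ℕ}
    (hij : i ≤ j) (hj : j < s.length) : s.getD i 0 ≤ s.getD j 0 := by
  rcases Nat.eq_or_lt_of_le hij with h | h
  · subst h; exact le_refl _
  · rw [List.getD_eq_getElem s 0 (lt_of_le_of_lt hij hj), List.getD_eq_getElem s 0 hj]
    exact List.pairwise_iff_getElem.mp hs i j (lt_of_le_of_lt hij hj) hj h

-- "b is the bisect_left position of x in s restricted to [0, N)"
def IsBL (s : List Int) (x : Int) (N : Int) (b : Int) : Prop :=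
  0 ≤ b ∧ b ≤ N ∧ (∀ j : ℕ, (j : ℤ) < b → s.getD j 0 < x) ∧
    (∀ j : ℕ, b ≤ (j : ℤ) → (j : ℤ) < N → x ≤ s.getD j 0)

theorem IsBL_unique {s : List Int} {x N b₁ b₂ : Int}
    (h₁ : IsBL s x N b₁) (h₂ : IsBL s x N b₂) : b₁ = b₂ := by
  obtain ⟨hb₁0, hb₁N, hlt₁, hge₁⟩ := h₁
  obtain ⟨hb₂0, hb₂N, hlt₂, hge₂⟩ := h₂
  by_contra hne
  rcases lt_or_gt_of_ne hne with h | h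
  · have h1 := hlt₂ b₁.toNat (by omega)
    have h2 := hge₁ b₁.toNat (by omega) (by omega)
    omega
  · have h1 := hlt₁ b₂.toNat (by omega)
    have h2 := hge₂ b₂.toNat (by omega) (by omega)
    omega

theorem bisLoop_isBL (s : List Int) (x N : Int)
    (hs : s.Pairwise (· ≤ ·)) (hNlen : N ≤ (s.length : Int)) :
    ∀ fuel : ℕ, ∀ lo hi : Int, (hi - lo).toNat ≤ fuel → 0 ≤ lo → lo ≤ hi → hi ≤ N →
    (∀ j : ℕ, (j : ℤ) < lo → s.getD j 0 < x) →
    (∀ j : ℕ, hi ≤ (j : ℤ) → (j : ℤ) < N → x ≤ s.getD j 0) →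
    IsBL s x N (bisLoop s x fuel lo hi) := by
  intro fuel
  induction fuel with
  | zero =>
    intro lo hi hn hlo0 hlohi hhiN Hlo Hhi
    have hle : lo = hi := by omega
    rw [show bisLoop s x 0 lo hi = lo from rfl]
    exact ⟨hlo0, by omega, Hlo, by rw [hle]; exact Hhi⟩
  | succ fuel ih =>
    intro lo hi hn hlo0 hlohi hhiN Hlo Hhi
    rw [bisLoop]
    by_cases hlt : lo < hi
    · rw [if_pos hlt]
      have hmid : PySem.Int.floordiv (lo + hi) 2 = (lo + hi) / 2 :=
        PySem.Int.floordiv_eq_ediv_of_pos (by norm_num)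
      have hmlo : lo ≤ PySem.Int.floordiv (lo + hi) 2 := by omega
      have hmhi : PySem.Int.floordiv (lo + hi) 2 < hi := by omega
      have hmidget : PySem.List.pyGetD s (PySem.Int.floordiv (lo + hi) 2) 0 =
          s.getD (PySem.Int.floordiv (lo + hi) 2).toNat 0 :=
        pyGetD_toNat s _ 0 (by omega)
      by_cases hc : PySem.List.pyGetD s (PySem.Int.floordiv (lo + hi) 2) 0 < x
      · rw [if_pos hc]
        refine ih (PySem.Int.floordiv (lo + hi) 2 + 1) hi (by omega) (by omega) (by omega) hhiN ?_ Hhi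
        intro j hj
        have hmono : s.getD j 0 ≤ s.getD (PySem.Int.floordiv (lo + hi) 2).toNat 0 :=
          getD_mono s hs (by omega) (by omega)
        rw [hmidget] at hc; omega
      · rw [if_neg hc]
        refine ih lo (PySem.Int.floordiv (lo + hi) 2) (by omega) hlo0 (by omega) (by omega) Hlo ?_
        intro j hj hjN
        have hmono : s.getD (PySem.Int.floordiv (lo + hi) 2).toNat 0 ≤ s.getD j 0 :=
          getD_mono s hs (by omega) (by omega)
        rw [hmidget] at hc; omega
    · rw [if_neg hlt]
      have hle : lo = hi := by omega
      exact ⟨hlo0, by omega, Hlo, by rw [hle]; exact Hhi⟩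

-- running max of (i - bisect_left(s, s[i]-K, 0, N) + 1) over i < m
def G (s : List Int) (N : Int) (K : Int) : ℕ → ℤ
  | 0 => 0
  | m + 1 => max (G s N K m) ((m : ℤ) - bisLoop s (s.getD m 0 - K) N.toNat 0 N + 1)

theorem G_nonneg (s : List Int) (N K : Int) (m : ℕ) : 0 ≤ G s N K m := by
  induction m with
  | zero => simp [G]
  | succ m ih => simp only [G]; omega

theorem G_const (s : List Int) (N K : Int) (p q : ℕ) (hpq : p ≤ q)
    (h : ∀ k : ℕ, p ≤ k → k < q → (k : ℤ) - bisLoop s (s.getD k 0 - K) N.toNat 0 N + 1 ≤ G s N K p) :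
    G s N K q = G s N K p := by
  induction q with
  | zero => have hp : p = 0 := by omega
            rw [hp]
  | succ q ih =>
    rcases Nat.eq_or_lt_of_le hpq with h' | h'
    · rw [h']
    · have hq : p ≤ q := by omega
      have heq := ih hq (fun k hk hkq => h k hk (by omega))
      simp only [G, heq]
      have := h q hq (by omega)
      omega

theorem alt_eq_G (N K : Int) (arr : List Int) (hN : 0 ≤ N) :
    bb_player_alt N K arr =
      G (PySem.List.sorted arr (fun x => x) false) N K N.toNat := by
  unfold bb_player_alt
  set s := PySem.List.sorted arr (fun x => x) false
  have key : ∀ m : ℕ, (m : ℤ) ≤ N →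
      (PySem.List.pyRange 0 (m : ℤ) 1).foldl
        (fun ret i => max ret (i - bisLoop s (PySem.List.pyGetD s i 0 - K) N.toNat 0 N + 1)) 0
      = G s N K m := by
    intro m
    induction m with
    | zero => intro _; simp [G]
    | succ m ih =>
      intro hm
      have hsplit : PySem.List.pyRange 0 ((m : ℤ) + 1) 1 =
          PySem.List.pyRange 0 (m : ℤ) 1 ++ PySem.List.pyRange (m : ℤ) ((m : ℤ) + 1) 1 :=
        PySem.List.pyRange_one_append 0 (m : ℤ) ((m : ℤ) + 1) (by omega) (by omega)
      have hone : PySem.List.pyRange (m : ℤ) ((m : ℤ) + 1) 1 = [(m : ℤ)] := by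
        rw [PySem.List.pyRange_one_cons (by omega), PySem.List.pyRange_one_eq_nil (by omega)]
      have hcast : ((m + 1 : ℕ) : ℤ) = (m : ℤ) + 1 := by push_cast; ring
      rw [hcast, hsplit, hone, List.foldl_append, ih (by omega)]
      simp only [List.foldl_cons, List.foldl_nil, G]
      rw [PySem.List.pyGetD_natCast]
  have h := key N.toNat (by omega)
  rw [show ((N.toNat : ℕ) : ℤ) = N from by omega] at h
  exact h

theorem loopA_eq (s : List Int) (N K : Int)
    (hs : s.Pairwise (· ≤ ·)) (hNlen : N ≤ (s.length : Int)) :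
    ∀ n : ℕ, ∀ l r ret : Int, (N - l).toNat + (N - r).toNat = n →
    0 ≤ l → l ≤ N → 0 ≤ r → r ≤ N → 0 ≤ ret → r - l ≤ ret →
    (∀ j : ℕ, (j : ℤ) < l → r < N → s.getD j 0 < s.getD r.toNat 0 - K) →
    ret = G s N K r.toNat →
    bbLoopA N K s n l r ret = G s N K N.toNat := by
  intro n
  induction n with
  | zero =>
    intro l r ret hn hl0 hlN hr0 hrN hret0 hretrl H2 hretG
    have hreq : r = N := by omega
    rw [hreq] at hretG
    exact hretG
  | succ n ih =>
    intro l r ret hn hl0 hlN hr0 hrN hret0 hretrl H2 hretG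
    rw [bbLoopA]
    by_cases hg : l < N ∧ r < N
    · rw [if_pos hg]
      obtain ⟨hlN', hrN'⟩ := hg
      have hrget : PySem.List.pyGetD s r 0 = s.getD r.toNat 0 := pyGetD_toNat s r 0 hr0
      have hlget : PySem.List.pyGetD s l 0 = s.getD l.toNat 0 := pyGetD_toNat s l 0 hl0
      by_cases hc : PySem.List.pyGetD s r 0 - PySem.List.pyGetD s l 0 > K
      · rw [if_pos hc]
        have hmax : max (r - (l + 1)) ret = ret := by omega
        rw [hmax]
        refine ih (l + 1) r ret (by omega) (by omega) (by omega) hr0 hrN hret0 (by omega) ?_ hretG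
        intro j hj hrltN
        by_cases hjl : (j : ℤ) < l
        · exact H2 j hjl hrltN
        · have hjeq : (j : ℤ) = l := by omega
          have hgd : s.getD j 0 = s.getD l.toNat 0 := by congr 1; omega
          rw [hgd, hrget, hlget] at *
          omega
      · rw [if_neg hc]
        -- the bisect position at right endpoint r is exactly l
        have hbl : bisLoop s (s.getD r.toNat 0 - K) N.toNat 0 N = l := by
          refine IsBL_unique
            (bisLoop_isBL s (s.getD r.toNat 0 - K) N hs hNlen N.toNat 0 N (by omega)
              (by omega) (by omega) (le_refl N) (by intro j hj; omega) (by intro j hj hjN; omega))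
            ⟨hl0, hlN, ?_, ?_⟩
          · intro j hj; exact H2 j hj hrN'
          · intro j hjl hjN
            have h1 : s.getD l.toNat 0 ≤ s.getD j 0 := getD_mono s hs (by omega) (by omega)
            rw [hrget, hlget] at hc
            omega
        refine ih l (r + 1) (max (r + 1 - l) ret) (by omega) hl0 hlN (by omega) (by omega)
          (by omega) (by omega) ?_ ?_
        · intro j hj hr1N
          have hstep : s.getD r.toNat 0 ≤ s.getD (r + 1).toNat 0 :=
            getD_mono s hs (by omega) (by omega)
          have := H2 j hj hrN'
          omega
        · have hcast : (r + 1).toNat = r.toNat + 1 := by omega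
          rw [hcast]
          simp only [G, hbl]
          have hrr : ((r.toNat : ℕ) : ℤ) = r := by omega
          rw [hrr, ← hretG]
          omega
    · rw [if_neg hg]
      by_cases hreq : r = N
      · rw [hreq] at hretG; exact hretG
      · -- l = N, r < N: every element of s[0..N) is below s[r]-K, so every later term is ≤ 0
        have hrltN : r < N := by omega
        rw [hretG]
        refine (G_const s N K r.toNat N.toNat (by omega) ?_).symm
        intro k hk hkN
        have hblk : bisLoop s (s.getD k 0 - K) N.toNat 0 N = N := by
          refine IsBL_unique
            (bisLoop_isBL s (s.getD k 0 - K) N hs hNlen N.toNat 0 N (by omega)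
              (by omega) (by omega) (le_refl N) (by intro j hj; omega)
              (by intro j hj hjN; omega))
            ⟨by omega, le_refl N, ?_, by intro j hjN hjN'; omega⟩
          intro j hj
          have h1 := H2 j (by omega) hrltN
          have h2 : s.getD r.toNat 0 ≤ s.getD k 0 := getD_mono s hs (by omega) (by omega)
          omega
        rw [hblk]
        have := G_nonneg s N K r.toNat
        omega

-- ===== VERDICT (by name: the statement is the Claim_ definition above) =====
theorem bb_player_spec : Claim_equal_bb_player := by
  intro N K arr _hdom hpre
  unfold Spec_bb_player bb_player
  set s := PySem.List.sorted arr (fun x => x) false with hsdef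
  have hs : s.Pairwise (· ≤ ·) := by
    have := PySem.List.sorted_pairwise arr (fun x => x)
    simpa using this
  have hlen : s.length = arr.length := PySem.List.length_sorted arr (fun x => x) false
  by_cases hN : 0 ≤ N
  · have hNlen : N ≤ (s.length : Int) := by rw [hlen]; exact hpre
    rw [loopA_eq s N K hs hNlen (N.toNat + N.toNat) 0 0 0 (by omega) (by omega) hN (by omega)
      hN (by omega) (by omega) (by intro j hj _; omega) (by simp [G])]
    rw [alt_eq_G N K arr hN]
  · have hz : N.toNat + N.toNat = 0 := by omega
    rw [hz, bbLoopA]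
    unfold bb_player_alt
    rw [PySem.List.pyRange_one_eq_nil (by omega)]
    simp
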